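-- pv_equiv track=rewrite | github.com/cdjasonj/datagrand | outputs/result_process.py | _change_type
-- ===== SOURCE A (Python) =====
-- def _change_type(label,start_index,end_index,type):
--     new_label = []
--     for idx,_label in enumerate(label):
--         #对范围内的label的类型进行修改
--         if idx >= start_index and idx <= end_index:
--             old_label = _label.split('-')
--             old_label[1] = type
--             new_label.append('-'.join(old_label))
--         else:
--             new_label.append(_label)
--     return new_label
-- ===== SOURCE B (Python) =====
-- def _retag(s, type):
--     parts = s.split('-')
--     parts[1] = type
--     return '-'.join(parts)
--
--
-- def _change_type(label, start_index, end_index, type):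
--     # three-segment slice decomposition: untouched prefix + retagged middle + untouched suffix
--     lo = max(0, start_index)
--     hi = min(len(label), end_index + 1)
--     if hi <= lo:
--         return list(label)
--     return label[:lo] + [_retag(s, type) for s in label[lo:hi]] + label[hi:]
-- ===== Notes on version B (the rewrite author's own statement) =====
-- stated objective: alternative
-- what changed: B builds the result as a three-segment slice concatenation label[:lo] + [retag middle] + label[hi:] with clamped bounds (early-returning a plain copy when the range is empty), instead of A's single loop that tests every index against the range and appends branch-by-branch.
import Mathlib
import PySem

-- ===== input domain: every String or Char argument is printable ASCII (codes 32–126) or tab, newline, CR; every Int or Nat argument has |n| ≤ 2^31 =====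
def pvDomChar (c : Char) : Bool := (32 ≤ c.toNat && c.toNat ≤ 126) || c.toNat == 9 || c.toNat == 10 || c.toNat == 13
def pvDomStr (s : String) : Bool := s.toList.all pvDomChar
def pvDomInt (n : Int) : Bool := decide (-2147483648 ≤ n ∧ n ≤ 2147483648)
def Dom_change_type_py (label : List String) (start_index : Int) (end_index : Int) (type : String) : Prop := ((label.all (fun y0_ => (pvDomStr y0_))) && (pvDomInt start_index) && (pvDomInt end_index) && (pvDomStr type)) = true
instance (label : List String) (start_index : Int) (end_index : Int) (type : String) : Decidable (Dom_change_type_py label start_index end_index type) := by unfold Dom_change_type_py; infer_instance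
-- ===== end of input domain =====

-- B assembles the result as three slices — untouched prefix, retagged middle, untouched
-- suffix — with clamped bounds, instead of A's branch-in-loop rebuild; same cost, different decomposition.

-- ===== PORT A =====
-- '-'.join of parts with parts[1] = type (pySetD is exact here: Pre_ guarantees parts has ≥ 2 elements)
def pvRetag (type s : String) : String :=
  PySem.Str.join "-" (PySem.List.pySetD ((PySem.Str.split? s "-").getD []) 1 type)

def change_type_py (label : List String) (start_index : Int) (end_index : Int) (type : String) : List String :=
  (PySem.List.enumerate label).foldl
    (fun new_label p =>
      if start_index ≤ p.1 ∧ p.1 ≤ end_index then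
        new_label ++ [pvRetag type p.2]
      else
        new_label ++ [p.2])
    []

-- ===== PORT B =====
def change_type_py_alt (label : List String) (start_index : Int) (end_index : Int) (type : String) : List String :=
  let lo : Int := max 0 start_index
  let hi : Int := min (label.length : Int) (end_index + 1)
  if hi ≤ lo then label
  else
    PySem.List.slice label none (some lo) ++
      (PySem.List.slice label (some lo) (some hi)).map (pvRetag type) ++
      PySem.List.slice label (some hi) none

-- ===== PRECONDITION & SPEC =====
-- Pre_ excludes exactly the inputs where Python A raises IndexError: an element inside the
-- requested index range whose string has no '-' (its split has fewer than 2 parts).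
def Pre_change_type_py (label : List String) (start_index : Int) (end_index : Int) (type : String) : Prop :=
  ∀ k ∈ List.range label.length,
    (start_index ≤ (k : Int) ∧ (k : Int) ≤ end_index) →
      2 ≤ ((PySem.Str.split? (label.getD k "") "-").getD []).length

instance (label : List String) (start_index : Int) (end_index : Int) (type : String) : Decidable (Pre_change_type_py label start_index end_index type) := by unfold Pre_change_type_py; infer_instance

def pvWitness_change_type_py : List String × Int × Int × String := (["B-a", "I-a", "O-b"], 1, 2, "z")

def Spec_change_type_py (label : List String) (start_index : Int) (end_index : Int) (type : String) (out : List String) : Prop := out = change_type_py_alt label start_index end_index type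
instance (label : List String) (start_index : Int) (end_index : Int) (type : String) (out : List String) : Decidable (Spec_change_type_py label start_index end_index type out) := by unfold Spec_change_type_py; infer_instance

-- ===== CLAIM (what is proved, stated in full; the proofs are below) =====
def Claim_equal_change_type_py : Prop := ∀ (label : List String) (start_index : Int) (end_index : Int) (type : String), Dom_change_type_py label start_index end_index type → Pre_change_type_py label start_index end_index type → Spec_change_type_py label start_index end_index type (change_type_py label start_index end_index type)

-- ===== LEMMAS AND PROOFS =====

-- A's loop is a map over the enumeration
theorem change_type_py_eq_map (label : List String) (s e : Int) (t : String) :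
    change_type_py label s e t =
      (PySem.List.enumerate label).map
        (fun p => if s ≤ p.1 ∧ p.1 ≤ e then pvRetag t p.2 else p.2) := by
  unfold change_type_py
  rw [PySem.List.foldl_congr_mem (PySem.List.enumerate label) _
        (fun acc p => acc ++ [if s ≤ p.1 ∧ p.1 ≤ e then pvRetag t p.2 else p.2]) []
        (by intro acc p _; by_cases h : s ≤ p.1 ∧ p.1 ≤ e <;> simp [h]),
      PySem.List.foldl_append_singleton_eq_map]
  simp

theorem change_type_py_spec' (label : List String) (s e : Int) (t : String) :
    change_type_py label s e t = change_type_py_alt label s e t := by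
  rw [change_type_py_eq_map]
  unfold change_type_py_alt
  by_cases hle : min (label.length : Int) (e + 1) ≤ max 0 s
  · rw [if_pos hle]
    apply List.ext_getElem?
    intro k
    rw [List.getElem?_map, PySem.List.getElem?_enumerate]
    by_cases hk : k < label.length
    · have hc : ¬ (s ≤ (k : Int) ∧ (k : Int) ≤ e) := by omega
      simp [hk, hc]
    · simp [hk]
  · rw [if_neg hle]
    have h0 : (0:Int) ≤ max 0 s := le_max_left _ _
    have hhi : (0:Int) ≤ min (label.length : Int) (e + 1) := by omega
    rw [PySem.List.slice_to _ h0, PySem.List.slice_toNat _ h0 hhi,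
        PySem.List.slice_from _ hhi]
    generalize hL : (max 0 s).toNat = L
    generalize hH : (min (label.length : Int) (e + 1)).toNat = H
    have hLH : L < H := by omega
    have hHlen : H ≤ label.length := by omega
    apply List.ext_getElem?
    intro k
    rw [List.getElem?_map, PySem.List.getElem?_enumerate]
    by_cases hk : k < label.length
    · have hcond : (s ≤ (k : Int) ∧ (k : Int) ≤ e) ↔ (L ≤ k ∧ k < H) := by omega
      rcases Nat.lt_or_ge k L with h1 | h1
      · have hc : ¬ (s ≤ (k : Int) ∧ (k : Int) ≤ e) := fun h => by
          have := hcond.mp h; omega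
        rw [List.getElem?_append_left
              (by simp only [List.length_append, List.length_take, List.length_map,
                    List.length_drop]; omega),
            List.getElem?_append_left (by rw [List.length_take]; omega)]
        simp [List.getElem?_take, h1, hk, hc]
      · rcases Nat.lt_or_ge k H with h2 | h2
        · have hc : s ≤ (k : Int) ∧ (k : Int) ≤ e := hcond.mpr ⟨h1, h2⟩
          rw [List.getElem?_append_left
                (by simp only [List.length_append, List.length_take, List.length_map,
                      List.length_drop]; omega),
              List.getElem?_append_right (by rw [List.length_take]; omega)]
          simp only [List.getElem?_map, List.getElem?_take, List.getElem?_drop,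
            List.length_take]
          rw [if_pos (by omega), show L + (k - min L label.length) = k from by omega,
              List.getElem?_eq_getElem hk]
          simp [hc]
        · have hc : ¬ (s ≤ (k : Int) ∧ (k : Int) ≤ e) := fun h => by
            have := hcond.mp h; omega
          rw [List.getElem?_append_right
                (by simp only [List.length_append, List.length_take, List.length_map,
                      List.length_drop]; omega)]
          simp only [List.getElem?_drop, List.length_append, List.length_take,
            List.length_map, List.length_drop]
          rw [show H + (k - (min L label.length + min (H - L) (label.length - L))) = k
                from by omega,
              List.getElem?_eq_getElem hk]
          simp [hc]
    · have h1 : label.length ≤ k := by omega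
      rw [List.getElem?_eq_none h1,
          List.getElem?_eq_none
            (by simp only [List.length_append, List.length_take, List.length_map,
                  List.length_drop]; omega)]
      simp

-- ===== VERDICT (by name: the statement is the Claim_ definition above) =====
theorem change_type_py_spec : Claim_equal_change_type_py := by
  intro label s e t _ _
  unfold Spec_change_type_py
  exact change_type_py_spec' label s e t
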